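-- pv_equiv track=rewrite | github.com/EugeniusK/CrossNumber | functions.py | untouchable
-- ===== SOURCE A (Python) =====
-- import math, json
--
-- arr = []
--
-- def untouchable(MAX_SIZE):
--     # untouchable
--     arr = list(range(1, MAX_SIZE + 1))
--
--     def sigma(n):
--         """
--         Sum of divisors
--         """
--         divisors = []
--         for x in range(1, math.isqrt(n) + 1):
--             if n % x == 0:
--                 divisors.append(x)
--                 divisors.append(n // x)
--         return sum(list(set(divisors)))
--
--     for x in range(MAX_SIZE**2):
--         result = sigma(x) - x
--         if result in arr:
--             arr.remove(result)
--     return sorted(list(set(arr)))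
-- ===== SOURCE B (Python) =====
-- def untouchable(MAX_SIZE):
--     # Sieve of proper-divisor sums (aliquot sums) up to MAX_SIZE**2, then mark
--     # which values in range(MAX_SIZE + 1) occur; the unmarked ones are untouchable.
--     N = MAX_SIZE ** 2
--     s = [0] * N
--     for d in range(1, N):
--         for m in range(2 * d, N, d):
--             s[m] += d
--     reached = [False] * (MAX_SIZE + 1)
--     for v in s:
--         if 0 <= v <= MAX_SIZE:
--             reached[v] = True
--     return [n for n in range(1, MAX_SIZE + 1) if not reached[n]]
-- ===== Notes on version B (the rewrite author's own statement) =====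
-- stated objective: faster
-- what changed: Replaces the per-number trial-division sigma plus repeated list membership/remove scans by a single additive divisor-sum sieve of all aliquot sums below MAX_SIZE^2, a boolean reached-array marking pass, and one filter over the candidate range.
import Mathlib
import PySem

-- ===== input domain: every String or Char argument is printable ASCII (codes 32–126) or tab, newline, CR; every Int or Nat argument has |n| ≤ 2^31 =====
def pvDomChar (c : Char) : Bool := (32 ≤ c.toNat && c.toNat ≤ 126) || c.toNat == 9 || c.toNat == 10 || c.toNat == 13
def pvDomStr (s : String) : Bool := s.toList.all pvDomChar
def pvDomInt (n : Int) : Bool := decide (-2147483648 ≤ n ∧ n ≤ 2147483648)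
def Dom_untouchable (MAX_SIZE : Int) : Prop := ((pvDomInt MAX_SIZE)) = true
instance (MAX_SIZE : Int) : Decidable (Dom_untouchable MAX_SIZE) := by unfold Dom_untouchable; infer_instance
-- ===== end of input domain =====

-- B replaces A's per-number trial-division sigma and repeated list remove scans by an
-- additive divisor-sum sieve over all indices below MAX_SIZE^2 plus a boolean reached-array filter (objective: faster).


-- ===== PORT A =====
-- inner helper `sigma(n)`: math.isqrt(n) is ported as Nat.sqrt n.toNat (exact for n ≥ 0;
-- sigma is only called on x ∈ range(MAX_SIZE**2), so n ≥ 0 always).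
def pyASigma (n : Int) : Int :=
  ((PySem.List.pyRange 1 ((Nat.sqrt n.toNat : Int) + 1) 1).foldl
    (fun ds x =>
      if PySem.Int.mod n x == 0 then (ds ++ [x]) ++ [PySem.Int.floordiv n x] else ds)
    ([] : List Int)
  |> PySem.Set.ofList).sum

def untouchable (MAX_SIZE : Int) : List Int :=
  let arr : List Int := PySem.List.pyRange 1 (MAX_SIZE + 1) 1
  let arr := (PySem.List.pyRange 0 (MAX_SIZE ^ 2) 1).foldl
    (fun arr x =>
      let result := pyASigma x - x
      if arr.contains result then (PySem.List.remove? arr result).getD arr else arr)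
    arr
  PySem.List.sorted (PySem.Set.ofList arr) (fun v => v)

-- ===== PORT B =====
def untouchable_alt (MAX_SIZE : Int) : List Int :=
  let N : Int := MAX_SIZE ^ 2
  let s : Array Int := Array.replicate N.toNat 0
  let s := (PySem.List.pyRange 1 N 1).foldl
    (fun s d =>
      (PySem.List.pyRange (2 * d) N d).foldl
        (fun s m => s.set! m.toNat (s.getD m.toNat 0 + d)) s)
    s
  let reached : Array Bool := Array.replicate (MAX_SIZE + 1).toNat false
  let reached := s.foldl
    (fun r v => if 0 ≤ v ∧ v ≤ MAX_SIZE then r.set! v.toNat true else r) reached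
  (PySem.List.pyRange 1 (MAX_SIZE + 1) 1).filter (fun n => !(reached.getD n.toNat false))

-- ===== PRECONDITION & SPEC =====
def Spec_untouchable (MAX_SIZE : Int) (out : List Int) : Prop := out = untouchable_alt MAX_SIZE
instance (MAX_SIZE : Int) (out : List Int) : Decidable (Spec_untouchable MAX_SIZE out) := by unfold Spec_untouchable; infer_instance

-- ===== CLAIM (what is proved, stated in full; the proofs are below) =====
def Claim_equal_untouchable : Prop := ∀ (MAX_SIZE : Int), Dom_untouchable MAX_SIZE → Spec_untouchable MAX_SIZE (untouchable MAX_SIZE)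

-- ===== LEMMAS AND PROOFS =====

-- the common mathematical value: the aliquot (proper-divisor) sum of m, as an Int
def aliq (m : Nat) : Int := ∑ d ∈ m.properDivisors, (d : Int)

lemma foldl_erase_filter (f : Int → Int) (L : List Int) :
    ∀ base : List Int, base.Nodup →
      L.foldl (fun arr x => arr.erase (f x)) base
        = base.filter (fun v => !(L.map f).contains v) := by
  induction L with
  | nil => intro base _; simp
  | cons x L ih =>
    intro base hb
    simp only [List.foldl_cons, List.map_cons]
    rw [ih _ (hb.erase _), List.Nodup.erase_eq_filter hb, List.filter_filter]
    apply List.filter_congr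
    intro v _
    simp only [bne, List.contains_cons, Bool.not_or, Bool.and_comm]


lemma mem_divFlat (k : Nat) (v : Int) :
    (v ∈ (PySem.List.pyRange 1 ((Nat.sqrt k : Int) + 1) 1).flatMap
      (fun x => if PySem.Int.mod (k : Int) x == 0 then [x, PySem.Int.floordiv (k : Int) x] else []))
    ↔ ∃ d ∈ k.divisors, (d : Int) = v := by
  simp only [List.mem_flatMap, PySem.List.mem_pyRange_one]
  constructor
  · rintro ⟨x, ⟨hx1, hx2⟩, hv⟩
    have hxpos : 0 < x := by omega
    obtain ⟨j, rfl⟩ : ∃ j : Nat, x = (j : Int) := ⟨x.toNat, (Int.toNat_of_nonneg hxpos.le).symm⟩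
    have hj1 : 1 ≤ j := by exact_mod_cast hx1
    have hjs : j ≤ Nat.sqrt k := by have : (j:Int) < (Nat.sqrt k : Int) + 1 := hx2; exact_mod_cast Int.lt_add_one_iff.mp this
    split_ifs at hv with hmod
    · have hdvd : j ∣ k := by
        have := (beq_iff_eq).mp hmod
        rw [PySem.Int.mod_natCast] at this
        exact Nat.dvd_of_mod_eq_zero (by exact_mod_cast this)
      have hk : k ≠ 0 := by
        rintro rfl
        simp [Nat.sqrt] at hjs
        omega
      simp only [List.mem_cons, List.not_mem_nil, or_false] at hv
      rcases hv with rfl | rfl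
      · exact ⟨j, Nat.mem_divisors.mpr ⟨hdvd, hk⟩, rfl⟩
      · refine ⟨k / j, Nat.mem_divisors.mpr ⟨Nat.div_dvd_of_dvd hdvd, hk⟩, ?_⟩
        rw [PySem.Int.floordiv_natCast]
    · simp at hv
  · rintro ⟨d, hd, rfl⟩
    obtain ⟨hdvd, hk⟩ := Nat.mem_divisors.mp hd
    have hd1 : 1 ≤ d := Nat.one_le_iff_ne_zero.mpr (by rintro rfl; exact hk (Nat.eq_zero_of_zero_dvd hdvd))
    by_cases hsq : d ≤ Nat.sqrt k
    · refine ⟨(d : Int), ⟨by exact_mod_cast hd1, by exact_mod_cast Nat.lt_succ_of_le hsq⟩, ?_⟩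
      have : PySem.Int.mod (k : Int) (d : Int) == 0 := by
        rw [PySem.Int.mod_natCast]
        simp [Nat.mod_eq_zero_of_dvd hdvd]
      simp only [this, if_true, List.mem_cons, List.not_mem_nil, or_false]
      left; trivial
    · rw [Nat.not_le] at hsq
      have hq1 : 1 ≤ k / d := Nat.one_le_div_iff (by omega) |>.mpr (Nat.le_of_dvd (Nat.pos_of_ne_zero hk) hdvd)
      have hqs : k / d ≤ Nat.sqrt k := by
        have h1 : k / d ≤ k / (Nat.sqrt k + 1) := Nat.div_le_div_left hsq (Nat.succ_pos _)
        have h2 : k / (Nat.sqrt k + 1) < Nat.sqrt k + 1 :=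
          Nat.div_lt_of_lt_mul (Nat.lt_succ_sqrt k)
        omega
      refine ⟨((k / d : Nat) : Int), ⟨by exact_mod_cast hq1, by exact_mod_cast Nat.lt_succ_of_le hqs⟩, ?_⟩
      have hqdvd : (k / d) ∣ k := Nat.div_dvd_of_dvd hdvd
      have : PySem.Int.mod (k : Int) ((k / d : Nat) : Int) == 0 := by
        rw [PySem.Int.mod_natCast]
        simp [Nat.mod_eq_zero_of_dvd hqdvd]
      simp only [this, if_true, List.mem_cons, List.not_mem_nil, or_false]
      right
      rw [PySem.Int.floordiv_natCast, Nat.div_div_self hdvd hk]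

lemma pyASigma_natCast (k : Nat) : pyASigma (k : Int) = ∑ d ∈ k.divisors, (d : Int) := by
  unfold pyASigma
  rw [PySem.List.foldl_congr_mem _ _
    (fun ds x => ds ++ (if PySem.Int.mod (k : Int) x == 0
      then [x, PySem.Int.floordiv (k : Int) x] else [])) _
    (by intro ds x _; split_ifs <;> simp_all)]
  rw [PySem.List.foldl_append_eq_flatMap, List.nil_append, Int.toNat_natCast]
  set Lst := (PySem.List.pyRange 1 ((Nat.sqrt k : Int) + 1) 1).flatMap
      (fun x => if PySem.Int.mod (k : Int) x == 0 then [x, PySem.Int.floordiv (k : Int) x] else []) with hL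
  have hnd : (PySem.Set.ofList Lst).Nodup := PySem.Set.nodup_ofList _
  have hfin : (PySem.Set.ofList Lst).toFinset
      = k.divisors.map ⟨(Nat.cast : Nat → Int), Nat.cast_injective⟩ := by
    ext v
    simp only [List.mem_toFinset, PySem.Set.mem_ofList, Finset.mem_map,
      Function.Embedding.coeFn_mk]
    exact mem_divFlat k v
  calc (PySem.Set.ofList Lst).sum
      = (List.map id (PySem.Set.ofList Lst)).sum := by rw [List.map_id]
    _ = (PySem.Set.ofList Lst).toFinset.sum id := (List.sum_toFinset id hnd).symm
    _ = ∑ d ∈ k.divisors, (d : Int) := by rw [hfin, Finset.sum_map]; rfl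


lemma pyASigma_sub (k : Nat) : pyASigma (k : Int) - (k : Int) = aliq k := by
  rw [pyASigma_natCast, aliq]
  have := Nat.sum_divisors_eq_sum_properDivisors_add_self (n := k)
  have hc : (∑ d ∈ k.divisors, (d : Int)) = ((∑ d ∈ k.divisors, d : Nat) : Int) := by push_cast; ring
  have hp : (∑ d ∈ k.properDivisors, (d : Int)) = ((∑ d ∈ k.properDivisors, d : Nat) : Int) := by push_cast; ring
  rw [hc, hp]
  omega


-- Array cell update/read (indices always in range in the ports)
lemma array_getD_set {α : Type} (a : Array α) (i j : Nat) (v d : α) (hi : i < a.size) :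
    (a.set! i v).getD j d = if j = i then v else a.getD j d := by
  rw [Array.set!_eq_setIfInBounds, Array.getD_eq_getD_getElem?, Array.getD_eq_getD_getElem?,
    Array.getElem?_setIfInBounds]
  by_cases h : i = j
  · subst h; simp [hi]
  · rw [if_neg h, if_neg (fun hh => h hh.symm)]

lemma array_getD_replicate {α : Type} (n j : Nat) (v d : α) :
    (Array.replicate n v).getD j d = if j < n then v else d := by
  rw [Array.getD_eq_getD_getElem?]
  by_cases h : j < n
  · rw [Array.getElem?_eq_getElem (by simpa using h)]
    simp [h]
  · rw [Array.getElem?_eq_none (by simpa using h)]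
    simp [h]

-- size is preserved through the inner update loop
lemma inner_size (d : Int) (L : List Int) : ∀ s : Array Int,
    (L.foldl (fun s m => s.set! m.toNat (s.getD m.toNat 0 + d)) s).size = s.size := by
  induction L with
  | nil => intro s; rfl
  | cons m L ih => intro s; rw [List.foldl_cons, ih, Array.size_set!]

-- effect of the inner update loop on one cell
lemma inner_getD (d : Int) (L : List Int) : ∀ (s : Array Int),
    (∀ m ∈ L, 0 ≤ m ∧ m < (s.size : Int)) → ∀ j : Nat, j < s.size →
    (L.foldl (fun s m => s.set! m.toNat (s.getD m.toNat 0 + d)) s).getD j 0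
      = s.getD j 0 + d * (L.count (j : Int)) := by
  induction L with
  | nil => intro s _ j _; simp
  | cons m L ih =>
    intro s hm j hj
    obtain ⟨hm0, hmlt⟩ := hm m List.mem_cons_self
    have hmlen : m.toNat < s.size := by omega
    rw [List.foldl_cons]
    rw [ih _ (by
        intro x hx
        refine ⟨(hm x (List.mem_cons_of_mem _ hx)).1, ?_⟩
        rw [Array.size_set!]
        exact (hm x (List.mem_cons_of_mem _ hx)).2)
      j (by rw [Array.size_set!]; exact hj)]
    rw [array_getD_set s m.toNat j _ 0 hmlen]
    rw [List.count_cons]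
    by_cases hje : j = m.toNat
    · subst hje
      have hbeq : ((m == ((m.toNat : Nat) : Int)) = true) := by simp; omega
      rw [if_pos rfl, if_pos hbeq]
      push_cast
      ring
    · have : ¬ ((m == ((j : Nat) : Int)) = true) := by simp; omega
      rw [if_neg hje, if_neg this]
      push_cast
      ring

lemma nodup_pyRange_pos (a b : Int) {st : Int} (hs : 0 < st) :
    (PySem.List.pyRange a b st).Nodup := by
  rw [PySem.List.pyRange_of_pos a b hs]
  refine List.Nodup.map ?_ List.nodup_range
  intro k1 k2 h
  have : st * (k1 : Int) = st * (k2 : Int) := by exact add_left_cancel h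
  have := mul_left_cancel₀ hs.ne' this
  exact_mod_cast this

lemma count_pyRange_pos (a b v : Int) {st : Int} (hs : 0 < st) :
    ((PySem.List.pyRange a b st).count v : Int)
      = if (a ≤ v ∧ v < b ∧ st ∣ v - a) then 1 else 0 := by
  by_cases hmem : v ∈ PySem.List.pyRange a b st
  · rw [List.count_eq_one_of_mem (nodup_pyRange_pos a b hs) hmem,
      if_pos ((PySem.List.mem_pyRange_iff_of_pos hs v).mp hmem)]
    rfl
  · rw [List.count_eq_zero_of_not_mem hmem,
      if_neg (fun h => hmem ((PySem.List.mem_pyRange_iff_of_pos hs v).mpr h))]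
    rfl

-- effect of the whole sieve loop on one cell
lemma outer_getD (N : Int) (hN : 0 ≤ N) (L : List Int) (hL : ∀ e ∈ L, 0 < e) :
    ∀ (s : Array Int), s.size = N.toNat → ∀ j : Nat, j < N.toNat →
    (L.foldl (fun s d =>
        (PySem.List.pyRange (2 * d) N d).foldl
          (fun s m => s.set! m.toNat (s.getD m.toNat 0 + d)) s) s).getD j 0
      = s.getD j 0
        + (L.map (fun e => if (e ∣ (j : Int) ∧ 2 * e ≤ (j : Int)) then e else 0)).sum := by
  induction L with
  | nil => intro s _ j _; simp
  | cons e L ih =>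
    intro s hs j hj
    have he : 0 < e := hL e List.mem_cons_self
    have hjN : (j : Int) < N := by
      have := Int.toNat_of_nonneg hN
      omega
    have hslen : (s.size : Int) = N := by rw [hs, Int.toNat_of_nonneg hN]
    rw [List.foldl_cons]
    rw [ih (fun x hx => hL x (List.mem_cons_of_mem _ hx)) _
      (by rw [inner_size, hs]) j hj]
    rw [inner_getD e _ s (by
        intro m hm
        obtain ⟨h1, h2, _⟩ := (PySem.List.mem_pyRange_iff_of_pos he m).mp hm
        constructor <;> omega)
      j (by rw [hs]; exact hj)]
    rw [count_pyRange_pos (2*e) N (j : Int) he]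
    have hd2 : e ∣ 2 * e := dvd_mul_left e 2
    have hiff : (2*e ≤ (j:Int) ∧ (j:Int) < N ∧ e ∣ (j:Int) - 2*e) ↔ (e ∣ (j:Int) ∧ 2*e ≤ (j:Int)) := by
      constructor
      · rintro ⟨h1, _, h3⟩
        refine ⟨?_, h1⟩
        have := dvd_add h3 hd2
        simpa using this
      · rintro ⟨h1, h2⟩
        exact ⟨h2, hjN, dvd_sub h1 hd2⟩
    rw [if_congr hiff rfl rfl, List.map_cons, List.sum_cons]
    split_ifs <;> ring

lemma outer_size (N : Int) (L : List Int) : ∀ s : Array Int,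
    (L.foldl (fun s d =>
        (PySem.List.pyRange (2 * d) N d).foldl
          (fun s m => s.set! m.toNat (s.getD m.toNat 0 + d)) s) s).size
      = s.size := by
  induction L with
  | nil => intro s; rfl
  | cons e L ih => intro s; rw [List.foldl_cons, ih, inner_size]



lemma list_sum_range (n : Nat) (f : Nat → Int) :
    ((List.range n).map f).sum = ∑ i ∈ Finset.range n, f i := by
  simp [Finset.sum, Finset.range, Multiset.range]

lemma sum_cond_eq_aliq (N : Int) (hN : 0 ≤ N) (j : Nat) (hj : j < N.toNat) :
    ((PySem.List.pyRange 1 N 1).map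
        (fun e => if (e ∣ (j : Int) ∧ 2 * e ≤ (j : Int)) then e else 0)).sum
      = aliq j := by
  have hN1 : 1 ≤ N := by omega
  have hK : (N - 1).toNat = N.toNat - 1 := by omega
  set K := (N - 1).toNat with hKdef
  have hjK : j ≤ K := by omega
  rw [PySem.List.pyRange_one 1 N, List.map_map, list_sum_range]
  have hstep : ∀ i ∈ Finset.range K,
      ((fun e => if (e ∣ (j : Int) ∧ 2 * e ≤ (j : Int)) then e else 0) ∘ (fun k : Nat => 1 + (k : Int))) i
        = (if ((i + 1) ∣ j ∧ 2 * (i + 1) ≤ j) then ((i + 1 : Nat) : Int) else 0) := by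
    intro i _
    simp only [Function.comp]
    have h1 : ((1 + (i : Int)) ∣ (j : Int) ∧ 2 * (1 + (i : Int)) ≤ (j : Int)) ↔ ((i + 1) ∣ j ∧ 2 * (i + 1) ≤ j) := by
      constructor
      · rintro ⟨ha, hb⟩
        refine ⟨?_, by omega⟩
        have : ((i + 1 : Nat) : Int) ∣ (j : Int) := by push_cast; rw [add_comm]; exact ha
        exact_mod_cast this
      · rintro ⟨ha, hb⟩
        constructor
        · have : ((i + 1 : Nat) : Int) ∣ ((j : Nat) : Int) := Int.natCast_dvd_natCast.mpr ha
          push_cast at this; rw [add_comm]; exact this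
        · omega
    rw [if_congr h1 rfl rfl]
    split_ifs with h
    · push_cast; ring
    · rfl
  rw [Finset.sum_congr rfl hstep, ← Finset.sum_filter, aliq]
  refine Finset.sum_nbij' (fun i => i + 1) (fun d => d - 1) ?_ ?_ ?_ ?_ ?_
  · intro a ha
    simp only [Finset.mem_filter, Finset.mem_range] at ha
    obtain ⟨_, hdvd, hle⟩ := ha
    refine Nat.mem_properDivisors.mpr ⟨hdvd, ?_⟩
    show a + 1 < j
    omega
  · intro d hd
    obtain ⟨hdvd, hlt⟩ := Nat.mem_properDivisors.mp hd
    have hd1 : 1 ≤ d := by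
      rcases Nat.eq_zero_or_pos d with h | h
      · subst h; have := Nat.eq_zero_of_zero_dvd hdvd; omega
      · omega
    have h2d : 2 * d ≤ j := by
      obtain ⟨c, rfl⟩ := hdvd
      have hc2 : 2 ≤ c := by
        by_contra hc
        rw [Nat.not_le] at hc
        interval_cases c <;> omega
      calc 2 * d = d * 2 := by ring
        _ ≤ d * c := Nat.mul_le_mul_left d hc2
    simp only [Finset.mem_filter, Finset.mem_range]
    refine ⟨by omega, by rw [Nat.sub_add_cancel hd1]; exact hdvd, by omega⟩
  · intro a _; simp
  · intro d hd
    obtain ⟨hdvd, hlt⟩ := Nat.mem_properDivisors.mp hd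
    have hd1 : 1 ≤ d := by
      rcases Nat.eq_zero_or_pos d with h | h
      · subst h; have := Nat.eq_zero_of_zero_dvd hdvd; omega
      · omega
    simp only []
    omega
  · intro a _; rfl

-- the sieve array lists the aliquot sums of 0 .. N-1
lemma sieve_toList (N : Int) (hN : 0 ≤ N) :
    ((PySem.List.pyRange 1 N 1).foldl
      (fun s d =>
        (PySem.List.pyRange (2 * d) N d).foldl
          (fun s m => s.set! m.toNat (s.getD m.toNat 0 + d)) s)
      (Array.replicate N.toNat 0)).toList
    = (List.range N.toNat).map aliq := by
  set A := (PySem.List.pyRange 1 N 1).foldl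
      (fun s d =>
        (PySem.List.pyRange (2 * d) N d).foldl
          (fun s m => s.set! m.toNat (s.getD m.toNat 0 + d)) s)
      (Array.replicate N.toNat 0) with hA
  have hsize : A.size = N.toNat := by rw [hA, outer_size, Array.size_replicate]
  apply List.ext_getElem
  · rw [Array.length_toList, hsize, List.length_map, List.length_range]
  intro j hj1 hj2
  have hjN : j < N.toNat := by rw [Array.length_toList, hsize] at hj1; exact hj1
  have hget := outer_getD N hN (PySem.List.pyRange 1 N 1)
    (fun e he => by
      obtain ⟨h1, _⟩ := (PySem.List.mem_pyRange_one).mp he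
      omega)
    (Array.replicate N.toNat 0) (Array.size_replicate) j hjN
  rw [array_getD_replicate, if_pos hjN, zero_add, sum_cond_eq_aliq N hN j hjN] at hget
  rw [Array.getElem_toList, List.getElem_map, List.getElem_range]
  rw [← hget, Array.getD_eq_getD_getElem?, Array.getElem?_eq_getElem (by rw [hsize]; exact hjN)]
  rfl

-- the marking loop records exactly which values occur in the list
lemma mark_getD (M : Int) (L : List Int) : ∀ (r : Array Bool), r.size = (M + 1).toNat →
    ∀ n : Nat, n < (M + 1).toNat →
    (L.foldl (fun r v => if 0 ≤ v ∧ v ≤ M then r.set! v.toNat true else r) r).getD n false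
      = (r.getD n false || L.any (fun v => v == (n : Int))) := by
  induction L with
  | nil => intro r _ n _; simp
  | cons v L ih =>
    intro r hr n hn
    have hnM : (n : Int) ≤ M := by omega
    rw [List.foldl_cons, List.any_cons]
    by_cases hv : 0 ≤ v ∧ v ≤ M
    · have hvlen : v.toNat < r.size := by rw [hr]; omega
      rw [if_pos hv, ih _ (by rw [Array.size_set!, hr]) n hn,
        array_getD_set r v.toNat n true false hvlen]
      by_cases hvn : n = v.toNat
      · have : (v == (n : Int)) = true := by simp; omega
        rw [if_pos hvn, this]
        simp
      · have : (v == (n : Int)) = false := by simp; omega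
        rw [if_neg hvn, this]
        simp
    · have : (v == (n : Int)) = false := by simp; omega
      rw [if_neg hv, ih _ hr n hn, this]
      simp


-- ===== VERDICT (by name: the statement is the Claim_ definition above) =====
theorem untouchable_spec : Claim_equal_untouchable := by
  unfold Claim_equal_untouchable
  intro M _
  unfold Spec_untouchable untouchable untouchable_alt
  have hN : (0:Int) ≤ M ^ 2 := sq_nonneg M
  dsimp only
  rw [PySem.List.foldl_congr_mem _ _ (fun arr x => arr.erase (pyASigma x - x)) _ (by
    intro arr x _
    by_cases h : (pyASigma x - x) ∈ arr
    · have hc : arr.contains (pyASigma x - x) = true := by simpa [List.elem_iff] using h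
      simp only [hc, if_true]
      rw [PySem.List.remove?_eq_some_erase arr _ h]
      rfl
    · have hc : arr.contains (pyASigma x - x) = false := by simpa [List.elem_iff] using h
      simp only [hc, Bool.false_eq_true, if_false]
      exact (List.erase_of_not_mem h).symm)]
  rw [foldl_erase_filter (fun x => pyASigma x - x) _ _ (PySem.List.nodup_pyRange_one 1 (M+1))]
  have hmap : (PySem.List.pyRange 0 (M^2) 1).map (fun x => pyASigma x - x)
      = (List.range (M^2).toNat).map aliq := by
    rw [PySem.List.pyRange_zero (M^2), List.map_map]
    exact List.map_congr_left (fun k _ => pyASigma_sub k)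
  rw [hmap]
  set R := (List.range (M ^ 2).toNat).map aliq with hR
  set arrF := (PySem.List.pyRange 1 (M + 1) 1).filter (fun v => !R.contains v) with harrF
  have hnd : arrF.Nodup := (PySem.List.nodup_pyRange_one 1 (M + 1)).filter _
  have hpl : arrF.Pairwise (· < ·) := (PySem.List.pairwise_lt_pyRange_one 1 (M + 1)).filter _
  rw [PySem.Set.ofList_eq_self_of_nodup _ hnd,
    PySem.List.sorted_eq_of_perm_of_pairwise_lt arrF arrF _ (List.Perm.refl _) hpl]
  rw [← Array.foldl_toList, sieve_toList (M ^ 2) hN, harrF]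
  refine List.filter_congr ?_
  intro v hv
  obtain ⟨hv1, hv2⟩ := PySem.List.mem_pyRange_one.mp hv
  have hsz : v.toNat < (M + 1).toNat := by omega
  rw [mark_getD M R (Array.replicate (M + 1).toNat false) (by rw [Array.size_replicate]) v.toNat hsz,
    array_getD_replicate, if_pos hsz, Bool.false_or]
  congr 1
  rw [Bool.eq_iff_iff]
  constructor
  · intro h
    have hm : v ∈ R := by simpa using h
    refine List.any_eq_true.mpr ⟨v, hm, ?_⟩
    simp
    omega
  · intro h
    obtain ⟨x, hx, hxe⟩ := List.any_eq_true.mp h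
    have : x = v := by simp at hxe; omega
    subst this
    simpa using hx
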